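-- pv_equiv track=rewrite | github.com/gillianjansen/cisc121-final-project | app.py | library_binary_search
-- ===== SOURCE A (Python) =====
-- def library_binary_search(bookshelf, target_book):
--     # this performs a binary search to find a target book in an alphabetically-ordered bookshelf
--     # parameters:
--         # bookshelf (list): a sorted list of book titles (string)
--         # target_book (str): the title of the ook the user is looking for
--     # returns:
--         # str: a step-by-step log of the search process to display in the ui
--
--     search_log = f"Searching for: '{target_book}'\n" # going to build a log so that the user can see updates on what the search is doing
--     search_log += "-" * 40 + "\n"
--
--     if not target_book.strip(): # for if the user clicks search without typing anything
--         return "Please enter a book title to search for."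
--
--     low = 0 # low is index of first book in the list/search range
--     high = len(bookshelf) - 1 # high is the index of the last book
--
--     while low <= high: # search as long as low has not crossed high index
--         mid = (low + high) // 2  # find the exact middle of the list using floor division
--         current_book = bookshelf[mid]
--
--         search_log += f"Checking the middle of the current section (Index {mid}). \n"
--         search_log += f"The middle book is: '{current_book}'. \n"
--
--         target_lower = target_book.lower() # converting everything to lowercase in the event that the user types in "Title" and/or "title"
--         current_lower = current_book.lower()
--
--         # option 1. middle is the book
--         if current_lower == target_lower:
--             search_log += f"Success! We found '{current_book}'. \n"
--             return search_log # we found it, so we stop the function and return the log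
--
--         # option 2. target book comes alphabetically after the current book
--         elif current_lower < target_lower:
--             search_log += f"'{target_book}' comes after '{current_book}' alphabetically. \n"
--             search_log += "Ignoring left half of the shelf. \n\n"
--             low = mid + 1 # moving the low index up past the middle book (cuz we already searched the middle index)
--
--         # option 3. target book comes alphabetically before the current book
--         else:
--             search_log += f"'{target_book}' comes before '{current_book}' alphabetically. \n"
--             search_log += "Ignoring right half of the shelf. \n\n"
--             high = mid - 1 # moving the high index down past the middle
--
--     search_log += "Search complete. The book is not currently on this shelf." # this is if the loop finishes and we haven't returned the success message (aka the book isnt there)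
--     return search_log
-- ===== SOURCE B (Python) =====
-- def _render_step(target_book, step):
--     # renders one probe record as the exact log text A produces for that step
--     mid, book, c = step
--     text = f"Checking the middle of the current section (Index {mid}). \n"
--     text += f"The middle book is: '{book}'. \n"
--     if c == 0:
--         text += f"Success! We found '{book}'. \n"
--     elif c < 0:
--         text += f"'{target_book}' comes after '{book}' alphabetically. \n"
--         text += "Ignoring left half of the shelf. \n\n"
--     else:
--         text += f"'{target_book}' comes before '{book}' alphabetically. \n"
--         text += "Ignoring right half of the shelf. \n\n"
--     return text
--
--
-- def library_binary_search(bookshelf, target_book):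
--     # two phases: a recursive probe that records the trace of the binary search,
--     # then a renderer that turns the trace into the log text
--     header = f"Searching for: '{target_book}'\n" + "-" * 40 + "\n"
--
--     if not target_book.strip():
--         return "Please enter a book title to search for."
--
--     t = target_book.lower()
--
--     def probes(low, high):
--         # returns (list of (mid, book, cmp) records, the found book or None)
--         if low > high:
--             return [], None
--         mid = (low + high) // 2
--         book = bookshelf[mid]
--         b = book.lower()
--         if b == t:
--             return [(mid, book, 0)], book
--         elif b < t:
--             steps, found = probes(mid + 1, high)
--             return [(mid, book, -1)] + steps, found
--         else:
--             steps, found = probes(low, mid - 1)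
--             return [(mid, book, 1)] + steps, found
--
--     steps, found = probes(0, len(bookshelf) - 1)
--
--     body = ""
--     for step in steps:
--         body += _render_step(target_book, step)
--     if found is None:
--         body += "Search complete. The book is not currently on this shelf."
--     return header + body
-- ===== Notes on version B (the rewrite author's own statement) =====
-- stated objective: alternative
-- what changed: B splits the work into two phases: a recursive binary-search probe that returns the trace of (mid, book, comparison) records plus the found book, and a separate renderer that turns that trace into the exact log text, instead of A's single while loop that interleaves searching with string accumulation.
import Mathlib
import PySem

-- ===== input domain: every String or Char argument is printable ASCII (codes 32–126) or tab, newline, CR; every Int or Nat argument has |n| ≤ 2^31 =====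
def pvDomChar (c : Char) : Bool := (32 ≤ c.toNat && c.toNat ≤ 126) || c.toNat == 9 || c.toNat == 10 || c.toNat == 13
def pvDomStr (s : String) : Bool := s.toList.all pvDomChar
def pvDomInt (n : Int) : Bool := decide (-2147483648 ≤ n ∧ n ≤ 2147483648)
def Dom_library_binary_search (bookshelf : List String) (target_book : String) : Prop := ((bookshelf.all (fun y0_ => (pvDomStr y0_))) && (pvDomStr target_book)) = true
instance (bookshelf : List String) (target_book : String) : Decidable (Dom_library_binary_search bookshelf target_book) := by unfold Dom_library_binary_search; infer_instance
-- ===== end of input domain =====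

-- B is an alternative decomposition (compute the probe trace recursively, then render it); same cost, identical log text.

-- ===== PORT A =====
-- A's while loop as fuel-guarded recursion over (low, high, search_log); fuel = length+1 always
-- suffices since high-low shrinks each pass, so the fuel-0 branch is never reached from the top call.
def pvALoop (bookshelf : List String) (target_book : String) (fuel : Nat) (low high : Int) (search_log : String) : String :=
  match fuel with
  | 0 => search_log ++ "Search complete. The book is not currently on this shelf."
  | fuel + 1 =>
    if low ≤ high then
      let mid := PySem.Int.floordiv (low + high) 2
      let current_book := PySem.List.pyGetD bookshelf mid ""  -- index always in range (0 ≤ low ≤ mid ≤ high < len)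
      let log1 := search_log ++ "Checking the middle of the current section (Index " ++ PySem.Int.toStr mid ++ "). \n"
                    ++ "The middle book is: '" ++ current_book ++ "'. \n"
      let target_lower := PySem.Str.lower target_book
      let current_lower := PySem.Str.lower current_book
      if current_lower = target_lower then
        log1 ++ "Success! We found '" ++ current_book ++ "'. \n"
      else if current_lower < target_lower then
        pvALoop bookshelf target_book fuel (mid + 1) high
          (log1 ++ "'" ++ target_book ++ "' comes after '" ++ current_book ++ "' alphabetically. \n"
                ++ "Ignoring left half of the shelf. \n\n")
      else
        pvALoop bookshelf target_book fuel low (mid - 1)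
          (log1 ++ "'" ++ target_book ++ "' comes before '" ++ current_book ++ "' alphabetically. \n"
                ++ "Ignoring right half of the shelf. \n\n")
    else
      search_log ++ "Search complete. The book is not currently on this shelf."

def library_binary_search (bookshelf : List String) (target_book : String) : String :=
  let search_log := "Searching for: '" ++ target_book ++ "'\n" ++ "----------------------------------------" ++ "\n"
  if (PySem.Str.strip target_book) = "" then
    "Please enter a book title to search for."
  else
    pvALoop bookshelf target_book (bookshelf.length + 1) 0 (bookshelf.length - 1) search_log

-- ===== PORT B =====
-- phase 1: the recursive probe, returning the trace and the found book (if any); same fuel guard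
def pvBProbes (bookshelf : List String) (t : String) (fuel : Nat) (low high : Int) : List (Int × String × Int) × Option String :=
  match fuel with
  | 0 => ([], none)
  | fuel + 1 =>
    if low ≤ high then
      let mid := PySem.Int.floordiv (low + high) 2
      let book := PySem.List.pyGetD bookshelf mid ""  -- index always in range, as in A
      let b := PySem.Str.lower book
      if b = t then ([(mid, book, 0)], some book)
      else if b < t then
        let r := pvBProbes bookshelf t fuel (mid + 1) high
        ((mid, book, -1) :: r.1, r.2)
      else
        let r := pvBProbes bookshelf t fuel low (mid - 1)
        ((mid, book, 1) :: r.1, r.2)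
    else ([], none)

-- phase 2: render one probe record
def pvRenderStep (target_book : String) (step : Int × String × Int) : String :=
  let text := "Checking the middle of the current section (Index " ++ PySem.Int.toStr step.1 ++ "). \n"
                ++ "The middle book is: '" ++ step.2.1 ++ "'. \n"
  if step.2.2 = 0 then
    text ++ "Success! We found '" ++ step.2.1 ++ "'. \n"
  else if step.2.2 < 0 then
    text ++ "'" ++ target_book ++ "' comes after '" ++ step.2.1 ++ "' alphabetically. \n"
         ++ "Ignoring left half of the shelf. \n\n"
  else
    text ++ "'" ++ target_book ++ "' comes before '" ++ step.2.1 ++ "' alphabetically. \n"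
         ++ "Ignoring right half of the shelf. \n\n"

def library_binary_search_alt (bookshelf : List String) (target_book : String) : String :=
  let header := "Searching for: '" ++ target_book ++ "'\n" ++ "----------------------------------------" ++ "\n"
  if (PySem.Str.strip target_book) = "" then
    "Please enter a book title to search for."
  else
    let r := pvBProbes bookshelf (PySem.Str.lower target_book) (bookshelf.length + 1) 0 (bookshelf.length - 1)
    let body := r.1.foldl (fun acc step => acc ++ pvRenderStep target_book step) ""
    let body := if r.2.isNone then body ++ "Search complete. The book is not currently on this shelf." else body
    header ++ body

-- ===== PRECONDITION & SPEC =====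
def Spec_library_binary_search (bookshelf : List String) (target_book : String) (out : String) : Prop := out = library_binary_search_alt bookshelf target_book
instance (bookshelf : List String) (target_book : String) (out : String) : Decidable (Spec_library_binary_search bookshelf target_book out) := by unfold Spec_library_binary_search; infer_instance

-- ===== CLAIM (what is proved, stated in full; the proofs are below) =====
def Claim_equal_library_binary_search : Prop := ∀ (bookshelf : List String) (target_book : String), Dom_library_binary_search bookshelf target_book → Spec_library_binary_search bookshelf target_book (library_binary_search bookshelf target_book)

-- ===== LEMMAS AND PROOFS =====

theorem pvFoldl_append_str {α : Type} (f : α → String) (l : List α) (s : String) :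
    l.foldl (fun acc x => acc ++ f x) s = s ++ l.foldl (fun acc x => acc ++ f x) "" := by
  induction l generalizing s with
  | nil => simp
  | cons x xs ih =>
    simp only [List.foldl_cons]
    rw [ih (s ++ f x), ih ("" ++ f x)]
    simp [String.append_assoc]

-- the loop invariant: A's loop from (low, high) appends exactly the rendered trace of B's probe
theorem pvLoop_eq_probes (bookshelf : List String) (target_book : String) :
    ∀ (fuel : Nat) (low high : Int) (log : String),
      pvALoop bookshelf target_book fuel low high log =
        log ++ (pvBProbes bookshelf (PySem.Str.lower target_book) fuel low high).1.foldl
                 (fun acc step => acc ++ pvRenderStep target_book step) ""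
            ++ (if (pvBProbes bookshelf (PySem.Str.lower target_book) fuel low high).2.isNone then
                  "Search complete. The book is not currently on this shelf." else "") := by
  intro fuel
  induction fuel with
  | zero => intro low high log; simp [pvALoop, pvBProbes]
  | succ fuel ih =>
    intro low high log
    rw [pvALoop, pvBProbes]
    by_cases h : low ≤ high
    · simp only [if_pos h]
      by_cases h1 : PySem.Str.lower (PySem.List.pyGetD bookshelf (PySem.Int.floordiv (low + high) 2) "")
                      = PySem.Str.lower target_book
      · simp only [if_pos h1]
        simp [pvRenderStep, String.append_assoc]
      · simp only [if_neg h1]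
        by_cases h2 : PySem.Str.lower (PySem.List.pyGetD bookshelf (PySem.Int.floordiv (low + high) 2) "")
                        < PySem.Str.lower target_book
        · simp only [if_pos h2]
          rw [ih]
          simp only [List.foldl_cons]
          simp only [pvRenderStep]
          conv_rhs => rw [pvFoldl_append_str]
          simp [String.append_assoc]
        · simp only [if_neg h2]
          rw [ih]
          simp only [List.foldl_cons]
          simp only [pvRenderStep]
          conv_rhs => rw [pvFoldl_append_str]
          simp [String.append_assoc]
    · simp only [if_neg h]
      simp

-- ===== VERDICT (by name: the statement is the Claim_ definition above) =====
theorem library_binary_search_spec : Claim_equal_library_binary_search := by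
  intro bookshelf target_book _
  unfold Spec_library_binary_search library_binary_search library_binary_search_alt
  by_cases h : PySem.Str.strip target_book = ""
  · simp only [if_pos h]
  · simp only [if_neg h]
    rw [pvLoop_eq_probes bookshelf target_book (bookshelf.length + 1) 0 (bookshelf.length - 1)]
    split_ifs with hf <;> simp [String.append_assoc]
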